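-- pv_equiv track=rewrite | github.com/collinpikeusa/SoftwareProcess | RCube/dispatch.py | checkNumberOfColors
-- ===== SOURCE A (Python) =====
-- def checkNumberOfColors(cube, colors):
--     for color in colors:
--         numberOfColor = 0
--         for i in range(0, 54):
--             if(color == cube[i]):
--                 numberOfColor += 1
--         if(numberOfColor != 9):
--             return False
--     return True
-- ===== SOURCE B (Python) =====
-- def checkNumberOfColors(cube, colors):
--     if not colors:
--         return True
--     counts = {}
--     for i in range(54):
--         s = cube[i]
--         counts[s] = counts.get(s, 0) + 1
--     return all(counts.get(color, 0) == 9 for color in colors)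
-- ===== Notes on version B (the rewrite author's own statement) =====
-- stated objective: simpler
-- what changed: A rescans all 54 stickers once per color (nested loops); B tabulates sticker frequencies in one pass over the 54 indices and then checks each color with a single dict lookup.
import Mathlib
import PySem

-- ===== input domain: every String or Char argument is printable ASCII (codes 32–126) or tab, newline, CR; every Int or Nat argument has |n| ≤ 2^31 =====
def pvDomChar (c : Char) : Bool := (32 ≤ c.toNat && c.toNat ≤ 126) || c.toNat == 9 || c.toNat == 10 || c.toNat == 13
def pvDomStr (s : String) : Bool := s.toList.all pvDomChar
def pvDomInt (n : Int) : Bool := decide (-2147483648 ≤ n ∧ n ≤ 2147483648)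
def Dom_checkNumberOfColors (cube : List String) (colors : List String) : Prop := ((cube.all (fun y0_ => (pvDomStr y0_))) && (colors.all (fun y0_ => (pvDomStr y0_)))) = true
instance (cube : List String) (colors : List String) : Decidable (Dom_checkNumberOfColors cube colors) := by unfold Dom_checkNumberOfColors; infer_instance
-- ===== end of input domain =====

-- B replaces A's per-color rescan of the 54 stickers by one frequency-table pass plus one lookup pass (simpler decomposition).


-- ===== PORT A =====
-- inner loop: for i in range(0, 54): if color == cube[i]: numberOfColor += 1
def pvCountColor (cube : List String) (color : String) : Int :=
  (PySem.List.pyRange 0 54 1).foldl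
    (fun acc i => if color == (PySem.List.pyGet? cube i).getD "" then acc + 1 else acc) 0

def pvALoop (cube : List String) : List String → Bool
  | [] => true
  | color :: rest => if pvCountColor cube color ≠ 9 then false else pvALoop cube rest

def checkNumberOfColors (cube : List String) (colors : List String) : Bool :=
  pvALoop cube colors

-- ===== PORT B =====
-- counts = {}; for i in range(54): counts[cube[i]] = counts.get(cube[i], 0) + 1
def pvCounts (cube : List String) : PySem.Dict String Int :=
  (PySem.List.pyRange 0 54 1).foldl
    (fun d i => d.insert ((PySem.List.pyGet? cube i).getD "")
        (d.getD ((PySem.List.pyGet? cube i).getD "") 0 + 1)) PySem.Dict.empty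

def checkNumberOfColors_alt (cube : List String) (colors : List String) : Bool :=
  if colors.isEmpty then true
  else
    let counts := pvCounts cube
    colors.all (fun color => counts.getD color 0 == 9)

-- ===== PRECONDITION & SPEC =====
-- Pre_ excludes exactly the inputs where the Python A raises IndexError: cube shorter than 54 with colors nonempty.
def Pre_checkNumberOfColors (cube : List String) (colors : List String) : Prop :=
  colors = [] ∨ 54 ≤ cube.length
instance (cube : List String) (colors : List String) : Decidable (Pre_checkNumberOfColors cube colors) := by unfold Pre_checkNumberOfColors; infer_instance

def pvWitness_checkNumberOfColors : List String × List String :=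
  (List.replicate 9 "r" ++ List.replicate 9 "g" ++ List.replicate 9 "b" ++
   List.replicate 9 "w" ++ List.replicate 9 "o" ++ List.replicate 9 "y", ["r", "g", "b"])

def Spec_checkNumberOfColors (cube : List String) (colors : List String) (out : Bool) : Prop := out = checkNumberOfColors_alt cube colors
instance (cube : List String) (colors : List String) (out : Bool) : Decidable (Spec_checkNumberOfColors cube colors out) := by unfold Spec_checkNumberOfColors; infer_instance

-- ===== CLAIM (what is proved, stated in full; the proofs are below) =====
def Claim_equal_checkNumberOfColors : Prop := ∀ (cube : List String) (colors : List String), Dom_checkNumberOfColors cube colors → Pre_checkNumberOfColors cube colors → Spec_checkNumberOfColors cube colors (checkNumberOfColors cube colors)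

-- ===== LEMMAS AND PROOFS =====
-- The 54 stickers both ports look at, as a list.
def pvStickers (cube : List String) : List String :=
  (PySem.List.pyRange 0 54 1).map (fun i => (PySem.List.pyGet? cube i).getD "")

theorem pvCountColor_eq_count (cube : List String) (color : String) :
    pvCountColor cube color = ((pvStickers cube).count color : Int) := by
  unfold pvCountColor pvStickers
  rw [PySem.List.foldl_count_if]
  rw [List.count, List.countP_map]
  have h : (fun i => color == (PySem.List.pyGet? cube i).getD "") = ((fun x => x == color) ∘ fun i => (PySem.List.pyGet? cube i).getD "") := by
    funext a; exact BEq.comm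
  rw [h]; ring

theorem pvCounts_getD (cube : List String) (color : String) :
    (pvCounts cube).getD color 0 = ((pvStickers cube).count color : Int) := by
  unfold pvCounts pvStickers
  rw [← List.foldl_map (f := fun i => (PySem.List.pyGet? cube i).getD "")
        (g := fun (d : PySem.Dict String Int) s => d.insert s (d.getD s 0 + 1))]
  rw [PySem.Dict.getD_foldl_insert_add_one]
  simp

theorem pvALoop_eq_all (cube : List String) (colors : List String) :
    pvALoop cube colors = colors.all (fun color => (pvCounts cube).getD color 0 == 9) := by
  induction colors with
  | nil => rfl
  | cons c rest ih =>
      simp only [pvALoop, List.all_cons, ih, pvCounts_getD, pvCountColor_eq_count]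
      by_cases h : ((pvStickers cube).count c : Int) = 9 <;> simp [h]

-- ===== VERDICT (by name: the statement is the Claim_ definition above) =====
theorem checkNumberOfColors_spec : Claim_equal_checkNumberOfColors := by
  intro cube colors _ _
  unfold Spec_checkNumberOfColors checkNumberOfColors checkNumberOfColors_alt
  cases colors with
  | nil => rfl
  | cons c rest =>
      rw [if_neg (by simp)]
      exact pvALoop_eq_all cube (c :: rest)
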